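-- pv_equiv track=rewrite | github.com/valory-xyz/open-aea | plugins/aea-ci-helpers/aea_ci_helpers/check_third_party_hashes.py | check_hashes
-- ===== SOURCE A (Python) =====
-- from typing import Dict, List, Tuple
--
-- def check_hashes(
--     local_third_party: Dict[str, str],
--     upstream_maps: List[Tuple[str, Dict[str, str]]],
-- ) -> Tuple[List[Tuple[str, str, str, str]], List[str]]:
--     """Compare local third-party hashes against pre-fetched upstream maps.
--
--     A local entry is considered OK as soon as any upstream contains it
--     with a matching hash. If some upstream contains it with a different
--     hash and no upstream matches, it is reported as a mismatch. If no
--     reachable upstream knows about it at all, it is reported as missing.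
--
--     :param local_third_party: local ``third_party`` map.
--     :param upstream_maps: list of ``(display_spec, package_map)`` pairs
--         for every *reachable* upstream. Unreachable upstreams must be
--         handled (logged / tolerated) by the caller before invoking
--         this function.
--     :return: ``(mismatches, missing)`` where
--         * ``mismatches`` is a list of ``(package_id, local_hash,
--           remote_hash, upstream_spec)`` tuples,
--         * ``missing`` is a list of package IDs not found in any
--           reachable upstream.
--     """
--     mismatches: List[Tuple[str, str, str, str]] = []
--     missing: List[str] = []
--
--     for package_id, local_hash in sorted(local_third_party.items()):
--         seen_in_any = False
--         matched = False
--         pending_mismatches: List[Tuple[str, str, str, str]] = []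
--         for spec, remote_map in upstream_maps:
--             if package_id not in remote_map:
--                 continue
--             seen_in_any = True
--             remote_hash = remote_map[package_id]
--             if remote_hash == local_hash:
--                 matched = True
--                 break
--             pending_mismatches.append((package_id, local_hash, remote_hash, spec))
--
--         if not seen_in_any:
--             missing.append(package_id)
--         elif not matched:
--             mismatches.extend(pending_mismatches)
--
--     return mismatches, missing
-- ===== SOURCE B (Python) =====
-- from typing import Dict, List, Tuple
--
-- def check_hashes(
--     local_third_party: Dict[str, str],
--     upstream_maps: List[Tuple[str, Dict[str, str]]],
-- ) -> Tuple[List[Tuple[str, str, str, str]], List[str]]: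
--     """Upstream-major inverted index: one pass over all upstream entries builds,
--     per local package id, the list of (spec, remote_hash) that mention it; a
--     second pass over the sorted local entries then decides missing/matched/
--     mismatch from that prebuilt list (no per-package scan of the upstreams)."""
--     hits: Dict[str, List[Tuple[str, str]]] = {package_id: [] for package_id in local_third_party}
--     for spec, remote_map in upstream_maps:
--         for package_id, remote_hash in remote_map.items():
--             if package_id in hits:
--                 hits[package_id].append((spec, remote_hash))
--
--     mismatches: List[Tuple[str, str, str, str]] = []
--     missing: List[str] = []
--     for package_id, local_hash in sorted(local_third_party.items()):
--         found = hits[package_id]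
--         if not found:
--             missing.append(package_id)
--         elif all(remote_hash != local_hash for _, remote_hash in found):
--             mismatches.extend((package_id, local_hash, remote_hash, spec)
--                               for spec, remote_hash in found)
--     return mismatches, missing
-- ===== Notes on version B (the rewrite author's own statement) =====
-- stated objective: alternative
-- what changed: Inverts the loop nesting: instead of scanning the upstreams per sorted local package with a break/seen/matched/pending state machine, B makes one upstream-major pass that builds an inverted index (package id -> list of (spec, remote_hash) occurrences) and then decides missing/matched/mismatch per sorted local entry from the prebuilt index.
import Mathlib
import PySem

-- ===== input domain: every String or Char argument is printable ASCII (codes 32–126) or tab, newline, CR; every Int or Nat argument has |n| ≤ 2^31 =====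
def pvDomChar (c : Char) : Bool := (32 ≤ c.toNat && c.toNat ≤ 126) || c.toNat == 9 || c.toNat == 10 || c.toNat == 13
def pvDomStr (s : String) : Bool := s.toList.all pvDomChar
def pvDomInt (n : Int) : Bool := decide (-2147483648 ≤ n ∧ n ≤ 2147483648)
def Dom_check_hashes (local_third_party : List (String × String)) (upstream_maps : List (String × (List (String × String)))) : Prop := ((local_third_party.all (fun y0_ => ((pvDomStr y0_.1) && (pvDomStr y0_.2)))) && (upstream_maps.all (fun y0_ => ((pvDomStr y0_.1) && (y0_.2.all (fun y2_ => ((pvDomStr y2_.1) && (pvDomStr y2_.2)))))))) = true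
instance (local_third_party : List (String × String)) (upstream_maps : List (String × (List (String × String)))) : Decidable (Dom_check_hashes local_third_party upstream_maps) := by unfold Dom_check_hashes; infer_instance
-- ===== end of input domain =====

-- B inverts the loop nesting: one upstream-major pass builds an inverted index
-- (package id -> (spec, remote_hash) occurrences), then each sorted local entry is
-- decided from that index — A's per-package upstream scan with its break/seen/matched/
-- pending state machine disappears (objective: alternative).

-- ===== PORT A =====
-- inner 'for spec, remote_map in upstream_maps' loop, with break on a matching hash;
-- state (seen_in_any, matched, pending_mismatches)
def pvInnerA (package_id local_hash : String) :
    List (String × (List (String × String))) → Bool → Bool →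
    List (String × String × String × String) →
    Bool × Bool × List (String × String × String × String)
  | [], seen, matched, pending => (seen, matched, pending)
  | (spec, remote_map) :: rest, seen, matched, pending =>
    match (PySem.Dict.ofList remote_map).get? package_id with
    | none => pvInnerA package_id local_hash rest seen matched pending
    | some remote_hash =>
      if remote_hash == local_hash then (true, true, pending)   -- break
      else pvInnerA package_id local_hash rest true matched
             (pending ++ [(package_id, local_hash, remote_hash, spec)])

def check_hashes (local_third_party : List (String × String)) (upstream_maps : List (String × (List (String × String)))) : (List (String × String × String × String)) × List String :=
  (PySem.List.sorted2 (PySem.Dict.ofList local_third_party).items (fun p => p.1) (fun p => p.2)).foldl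
    (fun acc item =>
      let r := pvInnerA item.1 item.2 upstream_maps false false []
      if r.1 = false then (acc.1, acc.2 ++ [item.1])
      else if r.2.1 = false then (acc.1 ++ r.2.2, acc.2)
      else acc)
    ([], [])

-- ===== PORT B =====
-- hits = {pid: [] for pid in local_third_party}; then the upstream-major double loop
-- 'for spec, remote_map in upstream_maps: for pid, rh in remote_map.items(): if pid in hits: hits[pid].append((spec, rh))'
def pvIndex (local_third_party : List (String × String)) (upstream_maps : List (String × (List (String × String)))) :
    PySem.Dict String (List (String × String)) :=
  let hits0 := (PySem.Dict.ofList local_third_party).keys.foldl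
    (fun h k => h.insert k ([] : List (String × String))) PySem.Dict.empty
  upstream_maps.foldl
    (fun h sm => (PySem.Dict.ofList sm.2).items.foldl
      (fun h p => if h.contains p.1 then h.insert p.1 (h.getD p.1 [] ++ [(sm.1, p.2)]) else h) h)
    hits0

def check_hashes_alt (local_third_party : List (String × String)) (upstream_maps : List (String × (List (String × String)))) : (List (String × String × String × String)) × List String :=
  let hits := pvIndex local_third_party upstream_maps
  (PySem.List.sorted2 (PySem.Dict.ofList local_third_party).items (fun p => p.1) (fun p => p.2)).foldl
    (fun acc item =>
      let found := hits.getD item.1 []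
      if found.isEmpty then (acc.1, acc.2 ++ [item.1])
      else if found.all (fun p => p.2 != item.2) then
        (acc.1 ++ found.map (fun p => (item.1, item.2, p.2, p.1)), acc.2)
      else acc)
    ([], [])

-- ===== PRECONDITION & SPEC =====
def Spec_check_hashes (local_third_party : List (String × String)) (upstream_maps : List (String × (List (String × String)))) (out : (List (String × String × String × String)) × List String) : Prop := out = check_hashes_alt local_third_party upstream_maps
instance (local_third_party : List (String × String)) (upstream_maps : List (String × (List (String × String)))) (out : (List (String × String × String × String)) × List String) : Decidable (Spec_check_hashes local_third_party upstream_maps out) := by unfold Spec_check_hashes; infer_instance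

-- ===== CLAIM (what is proved, stated in full; the proofs are below) =====
def Claim_equal_check_hashes : Prop := ∀ (local_third_party : List (String × String)) (upstream_maps : List (String × (List (String × String)))), Dom_check_hashes local_third_party upstream_maps → Spec_check_hashes local_third_party upstream_maps (check_hashes local_third_party upstream_maps)

-- ===== LEMMAS AND PROOFS =====

-- the per-package view both ports compute: which (spec, remote_hash) mention the package
def pvPresent (package_id : String) (upstream_maps : List (String × (List (String × String)))) :
    List (String × String) :=
  upstream_maps.filterMap
    (fun sm => ((PySem.Dict.ofList sm.2).get? package_id).map (fun rh => (sm.1, rh)))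

lemma pvPresent_cons_none (pid spec : String) (m : List (String × String))
    (tl : List (String × (List (String × String))))
    (h : (PySem.Dict.ofList m).get? pid = none) :
    pvPresent pid ((spec, m) :: tl) = pvPresent pid tl := by
  simp [pvPresent, h]

lemma pvPresent_cons_some (pid spec rh : String) (m : List (String × String))
    (tl : List (String × (List (String × String))))
    (h : (PySem.Dict.ofList m).get? pid = some rh) :
    pvPresent pid ((spec, m) :: tl) = (spec, rh) :: pvPresent pid tl := by
  simp [pvPresent, h]

-- ---- A-side characterisation (state machine → pvPresent) ----

lemma pvInnerA_cons_none (pid lh spec : String) (m : List (String × String))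
    (tl : List (String × (List (String × String)))) (seen matched : Bool)
    (pending : List (String × String × String × String))
    (h : (PySem.Dict.ofList m).get? pid = none) :
    pvInnerA pid lh ((spec, m) :: tl) seen matched pending
      = pvInnerA pid lh tl seen matched pending := by
  simp [pvInnerA, h]

lemma pvInnerA_cons_some (pid lh spec rh : String) (m : List (String × String))
    (tl : List (String × (List (String × String)))) (seen matched : Bool)
    (pending : List (String × String × String × String))
    (h : (PySem.Dict.ofList m).get? pid = some rh) :
    pvInnerA pid lh ((spec, m) :: tl) seen matched pending
      = if rh == lh then (true, true, pending)
        else pvInnerA pid lh tl true matched (pending ++ [(pid, lh, rh, spec)]) := by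
  simp only [pvInnerA, h]

lemma pvInnerA_fst (pid lh : String) (u : List (String × (List (String × String)))) :
    ∀ (seen matched : Bool) (pending : List (String × String × String × String)),
      (pvInnerA pid lh u seen matched pending).1 = (seen || !(pvPresent pid u).isEmpty) := by
  induction u with
  | nil => intro seen matched pending; simp [pvInnerA, pvPresent]
  | cons hd tl ih =>
    intro seen matched pending
    obtain ⟨spec, m⟩ := hd
    cases h : (PySem.Dict.ofList m).get? pid with
    | none =>
      rw [pvInnerA_cons_none _ _ _ _ _ _ _ _ h, pvPresent_cons_none _ _ _ _ h]
      exact ih seen matched pending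
    | some rh =>
      rw [pvInnerA_cons_some _ _ _ _ _ _ _ _ _ h, pvPresent_cons_some _ _ _ _ _ h]
      by_cases hm : (rh == lh) = true
      · rw [if_pos hm]; simp
      · rw [if_neg hm, ih]; simp

lemma pvInnerA_matched (pid lh : String) (u : List (String × (List (String × String)))) :
    ∀ (seen : Bool) (pending : List (String × String × String × String)),
      (pvInnerA pid lh u seen false pending).2.1 = (pvPresent pid u).any (fun p => p.2 == lh) := by
  induction u with
  | nil => intro seen pending; simp [pvInnerA, pvPresent]
  | cons hd tl ih =>
    intro seen pending
    obtain ⟨spec, m⟩ := hd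
    cases h : (PySem.Dict.ofList m).get? pid with
    | none =>
      rw [pvInnerA_cons_none _ _ _ _ _ _ _ _ h, pvPresent_cons_none _ _ _ _ h]
      exact ih seen pending
    | some rh =>
      rw [pvInnerA_cons_some _ _ _ _ _ _ _ _ _ h, pvPresent_cons_some _ _ _ _ _ h]
      by_cases hm : (rh == lh) = true
      · rw [if_pos hm]; simp [hm]
      · rw [if_neg hm, ih]
        simp only [List.any_cons]
        rw [show (rh == lh) = false from by simpa using hm]
        simp

lemma pvInnerA_pending (pid lh : String) (u : List (String × (List (String × String)))) :
    ∀ (seen : Bool) (pending : List (String × String × String × String)),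
      (pvPresent pid u).any (fun p => p.2 == lh) = false →
      (pvInnerA pid lh u seen false pending).2.2
        = pending ++ (pvPresent pid u).map (fun p => (pid, lh, p.2, p.1)) := by
  induction u with
  | nil => intro seen pending _; simp [pvInnerA, pvPresent]
  | cons hd tl ih =>
    intro seen pending hno
    obtain ⟨spec, m⟩ := hd
    cases h : (PySem.Dict.ofList m).get? pid with
    | none =>
      rw [pvPresent_cons_none _ _ _ _ h] at hno ⊢
      rw [pvInnerA_cons_none _ _ _ _ _ _ _ _ h]
      exact ih seen pending hno
    | some rh =>
      rw [pvPresent_cons_some _ _ _ _ _ h] at hno ⊢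
      simp only [List.any_cons, Bool.or_eq_false_iff] at hno
      obtain ⟨hm, hrest⟩ := hno
      rw [pvInnerA_cons_some _ _ _ _ _ _ _ _ _ h,
          if_neg (show ¬ (rh == lh) = true by simp [hm]),
          ih _ _ hrest]
      simp

-- ---- B-side characterisation (inverted index → pvPresent) ----

-- a filter over a dict's items by key is the dict lookup
lemma filter_fst_eq_of_nodup (pid : String) :
    ∀ (l : List (String × String)), (l.map Prod.fst).Nodup → ∀ v, (pid, v) ∈ l →
      l.filter (fun p => p.1 == pid) = [(pid, v)] := by
  intro l
  induction l with
  | nil => intro _ v hv; simp at hv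
  | cons hd tl ih =>
    intro hnd v hv
    simp only [List.map_cons, List.nodup_cons] at hnd
    rcases List.mem_cons.mp hv with h1 | h2
    · subst h1
      have hnil : tl.filter (fun p => p.1 == pid) = [] := by
        rw [List.filter_eq_nil_iff]
        intro p hp hb
        have hpe : p.1 = pid := by simpa using hb
        have hm1 : p.1 ∈ tl.map Prod.fst := List.mem_map_of_mem (f := Prod.fst) hp
        exact hnd.1 (hpe ▸ hm1)
      simp [hnil]
    · have hne : hd.1 ≠ pid := by
        intro he
        have : pid ∈ tl.map Prod.fst := by
          simpa using List.mem_map_of_mem (f := Prod.fst) h2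
        exact hnd.1 (he ▸ this)
      rw [List.filter_cons, if_neg (by simpa using hne)]
      exact ih hnd.2 v h2

lemma dict_filter_items (d : PySem.Dict String String) (pid : String) (hnd : d.keys.Nodup) :
    d.items.filter (fun p => p.1 == pid)
      = match d.get? pid with
        | none => []
        | some rh => [(pid, rh)] := by
  cases h : d.get? pid with
  | none =>
    rw [List.filter_eq_nil_iff]
    intro p hp hb
    have hpe : p.1 = pid := by simpa using hb
    have : pid ∈ d.keys := hpe ▸ PySem.Dict.mem_keys_of_mem_items _ hp
    rw [PySem.Dict.get?_eq_none_iff_not_mem_keys] at h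
    exact h this
  | some rh =>
    exact filter_fst_eq_of_nodup pid d.items hnd rh (PySem.Dict.mem_items_of_get?_eq_some _ h)

-- one step of the index-building loop never changes which keys are present
lemma pvIndex_inner_contains (spec : String) (l : List (String × String))
    (h : PySem.Dict String (List (String × String))) (k : String) :
    (l.foldl (fun h p => if h.contains p.1 then h.insert p.1 (h.getD p.1 [] ++ [(spec, p.2)]) else h) h).contains k
      = h.contains k := by
  induction l generalizing h with
  | nil => rfl
  | cons hd tl ih =>
    simp only [List.foldl_cons]
    by_cases hc : h.contains hd.1 = true
    · rw [if_pos hc, ih]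
      rw [PySem.Dict.contains_insert]
      by_cases he : (k == hd.1) = true
      · simp [he, (by simpa using he : k = hd.1) ▸ hc]
      · simp [he]
    · rw [if_neg hc, ih]

lemma pvIndex_inner_getD (spec : String) (l : List (String × String)) (pid : String) :
    ∀ (h : PySem.Dict String (List (String × String))),
      (l.foldl (fun h p => if h.contains p.1 then h.insert p.1 (h.getD p.1 [] ++ [(spec, p.2)]) else h) h).getD pid []
        = h.getD pid [] ++ (if h.contains pid then (l.filter (fun p => p.1 == pid)).map (fun p => (spec, p.2)) else []) := by
  induction l with
  | nil => intro h; simp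
  | cons hd tl ih =>
    intro h
    simp only [List.foldl_cons]
    by_cases hc : h.contains hd.1 = true
    · rw [if_pos hc, ih]
      have hcon : (h.insert hd.1 (h.getD hd.1 [] ++ [(spec, hd.2)])).contains pid = h.contains pid := by
        rw [PySem.Dict.contains_insert]
        by_cases hpe : pid = hd.1
        · simp [hpe, hc]
        · simp [show (pid == hd.1) = false by simpa using hpe]
      by_cases he : hd.1 = pid
      · subst he
        rw [PySem.Dict.getD_insert, if_pos rfl, hcon]
        simp [hc]
      · rw [PySem.Dict.getD_insert, if_neg (fun he' => he he'.symm), hcon]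
        simp [show (hd.1 == pid) = false by simpa using he]
    · rw [if_neg hc, ih]
      by_cases he : hd.1 = pid
      · have hcf : h.contains pid = false := by
          rw [← he]; exact Bool.eq_false_iff.mpr hc
        simp [hcf]
      · simp [show (hd.1 == pid) = false by simpa using he]

lemma pvIndex_outer_getD (pid : String) (u : List (String × (List (String × String)))) :
    ∀ (h : PySem.Dict String (List (String × String))),
      (u.foldl (fun h sm => (PySem.Dict.ofList sm.2).items.foldl
          (fun h p => if h.contains p.1 then h.insert p.1 (h.getD p.1 [] ++ [(sm.1, p.2)]) else h) h) h).getD pid []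
        = h.getD pid [] ++ (if h.contains pid then pvPresent pid u else []) := by
  induction u with
  | nil => intro h; simp [pvPresent]
  | cons hd tl ih =>
    intro h
    obtain ⟨spec, m⟩ := hd
    simp only [List.foldl_cons]
    rw [ih, pvIndex_inner_getD, pvIndex_inner_contains,
        dict_filter_items _ _ (PySem.Dict.nodup_keys_ofList m)]
    cases hg : (PySem.Dict.ofList m).get? pid with
    | none =>
      rw [pvPresent_cons_none _ _ _ _ hg]
      simp
    | some rh =>
      rw [pvPresent_cons_some _ _ _ _ _ hg]
      by_cases hc : h.contains pid = true
      · simp [hc]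
      · simp [(by simpa using hc : h.contains pid = false)]

lemma pvBase_contains (l : List String) (pid : String) :
    ∀ (h : PySem.Dict String (List (String × String))),
      (l.foldl (fun h k => h.insert k ([] : List (String × String))) h).contains pid
        = (decide (pid ∈ l) || h.contains pid) := by
  induction l with
  | nil => intro h; simp
  | cons hd tl ih =>
    intro h
    simp only [List.foldl_cons]
    rw [ih, PySem.Dict.contains_insert]
    by_cases he : pid = hd
    · simp [he]
    · simp [he, show (pid == hd) = false by simpa using he]

lemma pvBase_getD (l : List String) (pid : String) :
    ∀ (h : PySem.Dict String (List (String × String))),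
      (l.foldl (fun h k => h.insert k ([] : List (String × String))) h).getD pid []
        = if pid ∈ l then [] else h.getD pid [] := by
  induction l with
  | nil => intro h; simp
  | cons hd tl ih =>
    intro h
    simp only [List.foldl_cons]
    rw [ih, PySem.Dict.getD_insert]
    by_cases he : pid ∈ tl
    · simp [he]
    · by_cases he2 : pid = hd
      · simp [he2]
      · simp [he, he2]

-- the index holds exactly pvPresent on every local package id
lemma pvIndex_getD (local_third_party : List (String × String))
    (u : List (String × (List (String × String)))) (pid : String)
    (hmem : pid ∈ (PySem.Dict.ofList local_third_party).keys) :
    (pvIndex local_third_party u).getD pid [] = pvPresent pid u := by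
  unfold pvIndex
  rw [pvIndex_outer_getD, pvBase_getD, pvBase_contains]
  simp [hmem]

-- ---- both per-item decisions agree ----

lemma step_eq (ltp : List (String × String)) (u : List (String × (List (String × String))))
    (acc : (List (String × String × String × String)) × List String)
    (item : String × String) (hmem : item.1 ∈ (PySem.Dict.ofList ltp).keys) :
    (let r := pvInnerA item.1 item.2 u false false []
     if r.1 = false then (acc.1, acc.2 ++ [item.1])
     else if r.2.1 = false then (acc.1 ++ r.2.2, acc.2)
     else acc)
    = (let found := (pvIndex ltp u).getD item.1 []
       if found.isEmpty then (acc.1, acc.2 ++ [item.1])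
       else if found.all (fun p => p.2 != item.2) then
         (acc.1 ++ found.map (fun p => (item.1, item.2, p.2, p.1)), acc.2)
       else acc) := by
  rw [show (pvIndex ltp u).getD item.1 [] = pvPresent item.1 u from pvIndex_getD ltp u item.1 hmem]
  simp only [pvInnerA_fst, pvInnerA_matched, Bool.false_or]
  have hall : ((pvPresent item.1 u).all (fun p => p.2 != item.2))
      = !((pvPresent item.1 u).any (fun p => p.2 == item.2)) := by
    simp only [List.all_eq_not_any_not, bne, Bool.not_not]
  by_cases he : (pvPresent item.1 u).isEmpty = true
  · rw [if_pos (show (!(pvPresent item.1 u).isEmpty) = false by simp [he]), if_pos he]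
  · rw [if_neg (show ¬ (!(pvPresent item.1 u).isEmpty) = false by simp [he]), if_neg he]
    by_cases ha : ((pvPresent item.1 u).any (fun p => p.2 == item.2)) = true
    · rw [if_neg (show ¬ ((pvPresent item.1 u).any (fun p => p.2 == item.2)) = false by rw [ha]; simp),
          if_neg (show ¬ ((pvPresent item.1 u).all (fun p => p.2 != item.2)) = true by rw [hall, ha]; simp)]
    · have ha' : ((pvPresent item.1 u).any (fun p => p.2 == item.2)) = false :=
        Bool.eq_false_iff.mpr ha
      rw [if_pos ha', if_pos (by rw [hall, ha']; rfl),
          pvInnerA_pending item.1 item.2 u false [] ha']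
      simp

-- ===== VERDICT (by name: the statement is the Claim_ definition above) =====
theorem check_hashes_spec : Claim_equal_check_hashes := by
  intro ltp u _
  unfold Spec_check_hashes check_hashes check_hashes_alt
  apply PySem.List.foldl_congr_mem
  intro acc item hitem
  have hmem : item.1 ∈ (PySem.Dict.ofList ltp).keys := by
    have : item ∈ (PySem.Dict.ofList ltp).items :=
      ((PySem.List.sorted2_perm _ _ _ _).mem_iff).mp hitem
    exact PySem.Dict.mem_keys_of_mem_items _ this
  exact step_eq ltp u acc item hmem
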